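-- pv_equiv track=rewrite | github.com/FrAnKlInSousa/code_problems | src/code_problems/code_wars/best_travel.py | best_travel
-- ===== SOURCE A (Python) =====
-- from itertools import combinations
-- from typing import List
--
-- def best_travel(maximum_distance: int, num_towns: int, distances: List[int]):
--     distances_group = combinations(distances, num_towns)
--     better_distance = [
--         sum(distances)
--         for distances in distances_group
--         if sum(distances) <= maximum_distance
--     ]
--     better_distance.sort(reverse=True)
--     if better_distance:
--         return better_distance[0]
-- ===== SOURCE B (Python) =====
-- def best_travel(maximum_distance, num_towns, distances):
--     # Bottom-up subset-sum DP: dp[j] = set of sums achievable with exactly j towns.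
--     if num_towns < 0 or num_towns > len(distances):
--         return None
--     k = num_towns
--     dp = [{0}] + [set() for _ in range(k)]
--     for x in distances:
--         dp = [dp[0]] + [dp[j + 1] | {s + x for s in dp[j]} for j in range(k)]
--     best = None
--     for s in dp[k]:
--         if s <= maximum_distance and (best is None or s > best):
--             best = s
--     return best
-- ===== Notes on version B (the rewrite author's own statement) =====
-- stated objective: faster
-- what changed: Replaces enumeration of all C(n,k) combinations (summing each) with a knapsack-style DP over (town count, set of achievable sums), deduplicating equal partial sums.
import Mathlib
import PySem

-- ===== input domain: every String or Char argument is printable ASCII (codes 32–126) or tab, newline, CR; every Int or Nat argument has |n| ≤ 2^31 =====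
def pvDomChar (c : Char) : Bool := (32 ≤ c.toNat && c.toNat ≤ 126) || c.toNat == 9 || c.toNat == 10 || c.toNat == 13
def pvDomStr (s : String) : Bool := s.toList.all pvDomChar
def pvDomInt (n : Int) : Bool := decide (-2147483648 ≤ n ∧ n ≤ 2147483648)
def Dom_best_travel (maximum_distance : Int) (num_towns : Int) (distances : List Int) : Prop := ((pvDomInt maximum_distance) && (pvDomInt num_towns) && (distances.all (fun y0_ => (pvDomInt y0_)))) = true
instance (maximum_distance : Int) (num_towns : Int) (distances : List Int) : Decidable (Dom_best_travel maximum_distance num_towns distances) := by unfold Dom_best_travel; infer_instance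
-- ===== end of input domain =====

-- B replaces A's enumeration of all C(n,k) combinations with a subset-sum DP over
-- (town count, set of achievable sums); objective: faster (dedup of equal partial sums).

-- ===== PORT A =====
-- itertools.combinations(xs, r) in Python's order (lexicographic by index); hand port, exact for r ≥ 0.
def pvCombs : Nat → List Int → List (List Int)
  | 0, _ => [[]]
  | _ + 1, [] => []
  | k + 1, x :: xs => (pvCombs k xs).map (fun c => x :: c) ++ pvCombs (k + 1) xs

def best_travel (maximum_distance : Int) (num_towns : Int) (distances : List Int) : Option Int :=
  -- distances_group = combinations(distances, num_towns)   (num_towns ≥ 0 by Pre_)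
  let distances_group := pvCombs num_towns.toNat distances
  -- better_distance = [sum(d) for d in distances_group if sum(d) <= maximum_distance]
  let better_distance := (distances_group.map List.sum).filter (fun s => decide (s ≤ maximum_distance))
  -- better_distance.sort(reverse=True); if better_distance: return better_distance[0]
  (PySem.List.sorted better_distance (fun s => s) true).head?

-- ===== PORT B =====
-- one round of 'dp = [dp[0]] + [dp[j+1] | {s + x for s in dp[j]} for j in range(k)]'
def pvRound (k : Nat) (x : Int) (dp : List (PySem.Set Int)) : List (PySem.Set Int) :=
  dp.getD 0 [] :: (List.range k).map (fun j => PySem.Set.union (dp.getD (j + 1) []) ((dp.getD j []).map (fun s => s + x)))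

def best_travel_alt (maximum_distance : Int) (num_towns : Int) (distances : List Int) : Option Int :=
  if num_towns < 0 ∨ num_towns > (distances.length : Int) then none
  else
    let k := num_towns.toNat
    let dp0 : List (PySem.Set Int) := [(0 : Int)] :: (List.range k).map (fun _ => PySem.Set.empty)
    let dpf := distances.foldl (fun dp x => pvRound k x dp) dp0
    (dpf.getD k []).foldl
      (fun best s =>
        if (decide (s ≤ maximum_distance) && (match best with | none => true | some b => decide (s > b))) then some s else best)
      none

-- ===== PRECONDITION & SPEC =====
-- Pre_ excludes exactly num_towns < 0, where Python A raises ValueError (combinations' r must be non-negative).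
def Pre_best_travel (maximum_distance : Int) (num_towns : Int) (distances : List Int) : Prop :=
  0 ≤ num_towns
instance (maximum_distance : Int) (num_towns : Int) (distances : List Int) : Decidable (Pre_best_travel maximum_distance num_towns distances) := by unfold Pre_best_travel; infer_instance

def pvWitness_best_travel : Int × Int × List Int := (10, 2, [1, 2, 3])

def Spec_best_travel (maximum_distance : Int) (num_towns : Int) (distances : List Int) (out : Option Int) : Prop := out = best_travel_alt maximum_distance num_towns distances
instance (maximum_distance : Int) (num_towns : Int) (distances : List Int) (out : Option Int) : Decidable (Spec_best_travel maximum_distance num_towns distances out) := by unfold Spec_best_travel; infer_instance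

-- ===== CLAIM (what is proved, stated in full; the proofs are below) =====
def Claim_equal_best_travel : Prop := ∀ (maximum_distance : Int) (num_towns : Int) (distances : List Int), Dom_best_travel maximum_distance num_towns distances → Pre_best_travel maximum_distance num_towns distances → Spec_best_travel maximum_distance num_towns distances (best_travel maximum_distance num_towns distances)
-- ===== LEMMAS AND PROOFS =====

-- conditional running maximum: the common characterisation both programs are reduced to
def pvCondMax (M : Int) (l : List Int) : Option Int :=
  l.foldl (fun b s => if s ≤ M then some (max (b.getD s) s) else b) none

theorem pvCondMax_foldl_char (M : Int) (l : List Int) (b : Option Int) :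
    match l.foldl (fun b s => if s ≤ M then some (max (b.getD s) s) else b) b with
    | none => b = none ∧ ∀ y ∈ l, ¬ (y ≤ M)
    | some m => (b = some m ∨ (m ∈ l ∧ m ≤ M)) ∧ (∀ m0, b = some m0 → m0 ≤ m) ∧ ∀ y ∈ l, y ≤ M → y ≤ m := by
  induction l generalizing b with
  | nil => cases b with
    | none => exact ⟨rfl, by simp⟩
    | some m => exact ⟨Or.inl rfl, by intro m0 h; cases h; exact le_refl _, by simp⟩
  | cons x t ih =>
    simp only [List.foldl_cons]
    by_cases hx : x ≤ M
    · rw [if_pos hx]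
      cases b with
      | none =>
        simp only [Option.getD_none, max_self]
        have h := ih (some x)
        cases hfold : t.foldl _ (some x) with
        | none => rw [hfold] at h; exact absurd h.1 (by simp)
        | some m =>
          rw [hfold] at h
          obtain ⟨h1, h2, h3⟩ := h
          refine ⟨?_, by simp, ?_⟩
          · rcases h1 with h1 | h1
            · injection h1 with h1; subst h1; exact Or.inr ⟨List.mem_cons_self, hx⟩
            · exact Or.inr ⟨List.mem_cons_of_mem _ h1.1, h1.2⟩
          · intro y hy hyM
            rcases List.mem_cons.mp hy with rfl | hy
            · exact h2 y rfl
            · exact h3 y hy hyM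
      | some bb =>
        simp only [Option.getD_some]
        have h := ih (some (max bb x))
        cases hfold : t.foldl _ (some (max bb x)) with
        | none => rw [hfold] at h; exact absurd h.1 (by simp)
        | some m =>
          rw [hfold] at h
          obtain ⟨h1, h2, h3⟩ := h
          refine ⟨?_, ?_, ?_⟩
          · rcases h1 with h1 | h1
            · injection h1 with h1; subst h1
              rcases max_choice bb x with hm | hm
              · exact Or.inl (by rw [hm])
              · exact Or.inr ⟨by rw [hm]; exact List.mem_cons_self, by rw [hm]; exact hx⟩
            · exact Or.inr ⟨List.mem_cons_of_mem _ h1.1, h1.2⟩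
          · intro m0 hb
            injection hb with hb; subst hb
            exact le_trans (le_max_left _ _) (h2 _ rfl)
          · intro y hy hyM
            rcases List.mem_cons.mp hy with rfl | hy
            · exact le_trans (le_max_right bb y) (h2 _ rfl)
            · exact h3 y hy hyM
    · rw [if_neg hx]
      have h := ih b
      cases hfold : t.foldl _ b with
      | none =>
        rw [hfold] at h
        exact ⟨h.1, by intro y hy; rcases List.mem_cons.mp hy with rfl | hy; exact hx; exact h.2 y hy⟩
      | some m =>
        rw [hfold] at h
        obtain ⟨h1, h2, h3⟩ := h
        refine ⟨?_, h2, ?_⟩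
        · rcases h1 with h1 | h1
          · exact Or.inl h1
          · exact Or.inr ⟨List.mem_cons_of_mem _ h1.1, h1.2⟩
        · intro y hy hyM
          rcases List.mem_cons.mp hy with rfl | hy
          · exact absurd hyM hx
          · exact h3 y hy hyM

theorem pvCondMax_none_iff (M : Int) (l : List Int) :
    pvCondMax M l = none ↔ ∀ y ∈ l, ¬ (y ≤ M) := by
  have h := pvCondMax_foldl_char M l none
  constructor
  · intro hn; rw [show l.foldl _ none = pvCondMax M l from rfl, hn] at h; exact h.2
  · intro hall
    cases hfold : pvCondMax M l with
    | none => rfl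
    | some m =>
      rw [show l.foldl _ none = pvCondMax M l from rfl, hfold] at h
      rcases h.1 with h1 | h1
      · cases h1
      · exact absurd h1.2 (hall m h1.1)

theorem pvCondMax_some (M : Int) (l : List Int) (m : Int) (h : pvCondMax M l = some m) :
    m ∈ l ∧ m ≤ M ∧ ∀ y ∈ l, y ≤ M → y ≤ m := by
  have hc := pvCondMax_foldl_char M l none
  rw [show l.foldl _ none = pvCondMax M l from rfl, h] at hc
  rcases hc.1 with h1 | h1
  · cases h1
  · exact ⟨h1.1, h1.2, hc.2.2⟩

theorem pvCondMax_eq_some (M : Int) (l : List Int) (m : Int)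
    (hm : m ∈ l) (hM : m ≤ M) (hmax : ∀ y ∈ l, y ≤ M → y ≤ m) :
    pvCondMax M l = some m := by
  cases hfold : pvCondMax M l with
  | none => exact absurd hM ((pvCondMax_none_iff M l).mp hfold m hm)
  | some m' =>
    obtain ⟨hm', hM', hmax'⟩ := pvCondMax_some M l m' hfold
    have := le_antisymm (hmax m' hm' hM') (hmax' m hm hM)
    rw [this]

theorem pvCondMax_congr (M : Int) (l1 l2 : List Int) (h : ∀ y, y ∈ l1 ↔ y ∈ l2) :
    pvCondMax M l1 = pvCondMax M l2 := by
  cases hfold : pvCondMax M l1 with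
  | none =>
    have := (pvCondMax_none_iff M l1).mp hfold
    exact ((pvCondMax_none_iff M l2).mpr (fun y hy => this y ((h y).mpr hy))).symm
  | some m =>
    obtain ⟨hm, hM, hmax⟩ := pvCondMax_some M l1 m hfold
    exact (pvCondMax_eq_some M l2 m ((h m).mp hm) hM
      (fun y hy hyM => hmax y ((h y).mpr hy) hyM)).symm

-- A's head-of-reverse-sorted-filter equals pvCondMax
theorem pvA_eq_condMax (M : Int) (l : List Int) :
    (PySem.List.sorted (l.filter (fun s => decide (s ≤ M))) (fun s => s) true).head? = pvCondMax M l := by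
  cases hs : PySem.List.sorted (l.filter (fun s => decide (s ≤ M))) (fun s => s) true with
  | nil =>
    have hfil : l.filter (fun s => decide (s ≤ M)) = [] := by
      exact (PySem.List.sorted_eq_nil_iff _ _ _).mp hs
    symm
    rw [List.head?_nil, pvCondMax_none_iff]
    intro y hy hyM
    have : y ∈ l.filter (fun s => decide (s ≤ M)) := List.mem_filter.mpr ⟨hy, by simpa⟩
    rw [hfil] at this
    exact absurd this (List.not_mem_nil)
  | cons h t =>
    have hmem : h ∈ l.filter (fun s => decide (s ≤ M)) := by
      rw [← PySem.List.mem_sorted (key := fun s => s) (rev := true)]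
      rw [hs]; exact List.mem_cons_self
    have hhl : h ∈ l := (List.mem_filter.mp hmem).1
    have hhM : h ≤ M := by simpa using (List.mem_filter.mp hmem).2
    have hge := PySem.List.key_head_sorted_rev_ge (xs := l.filter (fun s => decide (s ≤ M)))
      (key := fun s => s) hs
    symm
    simp only [List.head?_cons]
    exact pvCondMax_eq_some M l h hhl hhM (fun y hy hyM =>
      hge y (List.mem_filter.mpr ⟨hy, by simpa⟩))

-- B's final fold equals pvCondMax
theorem pvB_fold_eq_condMax (M : Int) (l : List Int) :
    l.foldl (fun best s =>
        if (decide (s ≤ M) && (match best with | none => true | some b => decide (s > b))) then some s else best) none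
      = pvCondMax M l := by
  unfold pvCondMax
  have hstep : (fun (best : Option Int) (s : Int) =>
      if (decide (s ≤ M) && (match best with | none => true | some b => decide (s > b))) then some s else best)
      = (fun (b : Option Int) (s : Int) => if s ≤ M then some (max (b.getD s) s) else b) := by
    funext b s
    by_cases hM : s ≤ M
    · cases b with
      | none => simp [hM]
      | some bb =>
        by_cases hgt : s > bb
        · simp [hM, hgt, max_eq_right (le_of_lt hgt)]
        · simp [hM, hgt, max_eq_left (show s ≤ bb by omega)]
    · cases b with
      | none => simp [hM]
      | some bb => simp [hM]
  rw [hstep]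

-- no combinations of more elements than the list has
theorem pvCombs_nil (k : Nat) (xs : List Int) (h : xs.length < k) : pvCombs k xs = [] := by
  induction xs generalizing k with
  | nil => cases k with
    | zero => omega
    | succ t => rfl
  | cons x t ih =>
    cases k with
    | zero => omega
    | succ m =>
      simp only [pvCombs, List.append_eq_nil_iff, List.map_eq_nil_iff]
      simp only [List.length_cons] at h
      exact ⟨ih m (by omega), ih (m + 1) (by omega)⟩

-- getD facts about one DP round
theorem pvRound_getD_zero (k : Nat) (x : Int) (dp : List (PySem.Set Int)) :
    (pvRound k x dp).getD 0 [] = dp.getD 0 [] := rfl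

theorem pvRound_getD_succ (k : Nat) (x : Int) (dp : List (PySem.Set Int)) (j : Nat) (hj : j < k) :
    (pvRound k x dp).getD (j + 1) [] = PySem.Set.union (dp.getD (j + 1) []) ((dp.getD j []).map (fun s => s + x)) := by
  unfold pvRound
  rw [List.getD_cons_succ]
  rw [List.getD_eq_getElem?_getD, List.getElem?_map, List.getElem?_range hj]
  rfl

-- membership in a dp level after folding all distances
theorem pv_dp_mem (ds : List Int) (k : Nat) (dp : List (PySem.Set Int)) (j : Nat) (hj : j ≤ k) (v : Int) :
    v ∈ (ds.foldl (fun dp x => pvRound k x dp) dp).getD j []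
      ↔ ∃ i, i ≤ j ∧ ∃ c ∈ pvCombs i ds, ∃ s ∈ dp.getD (j - i) [], v = s + c.sum := by
  induction ds generalizing dp with
  | nil =>
    simp only [List.foldl_nil]
    constructor
    · intro hv
      exact ⟨0, Nat.zero_le _, [], by simp [pvCombs], v, by simpa using hv, by simp⟩
    · rintro ⟨i, hi, c, hc, s, hs, rfl⟩
      cases i with
      | zero =>
        simp only [pvCombs, List.mem_singleton] at hc
        subst hc
        simpa using hs
      | succ i0 => simp [pvCombs] at hc
  | cons x xs ih =>
    simp only [List.foldl_cons]
    rw [ih (pvRound k x dp)]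
    constructor
    · rintro ⟨i, hi, c, hc, s, hs, rfl⟩
      rcases hsub : j - i with _ | t
      · -- j - i = 0, so i = j; s ∈ dp.getD 0
        rw [hsub, pvRound_getD_zero] at hs
        have hij : i = j := by omega
        refine ⟨i, hi, c, ?_, s, ?_, rfl⟩
        · cases i with
          | zero => simpa [pvCombs] using hc
          | succ i0 => simp only [pvCombs, List.mem_append]; exact Or.inr hc
        · rw [hsub]; exact hs
      · rw [hsub, pvRound_getD_succ k x dp t (by omega)] at hs
        rcases (PySem.Set.mem_union _ _ _).mp hs with hs | hs
        · refine ⟨i, hi, c, ?_, s, ?_, rfl⟩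
          · cases i with
            | zero => simpa [pvCombs] using hc
            | succ i0 => simp only [pvCombs, List.mem_append]; exact Or.inr hc
          · rw [hsub]; exact hs
        · rcases List.mem_map.mp hs with ⟨s0, hs0, rfl⟩
          refine ⟨i + 1, by omega, x :: c, ?_, s0, ?_, by simp; ring⟩
          · simp only [pvCombs, List.mem_append]
            exact Or.inl (List.mem_map.mpr ⟨c, hc, rfl⟩)
          · have : j - (i + 1) = t := by omega
            rw [this]; exact hs0
    · rintro ⟨i, hi, c, hc, s, hs, rfl⟩
      cases i with
      | zero =>
        simp only [pvCombs, List.mem_singleton] at hc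
        subst hc
        refine ⟨0, Nat.zero_le _, [], by simp [pvCombs], s, ?_, by simp⟩
        simp only [Nat.sub_zero] at hs ⊢
        rcases hj0 : j with _ | t
        · rw [pvRound_getD_zero]; rw [hj0] at hs; exact hs
        · rw [pvRound_getD_succ k x dp t (by omega)]
          exact (PySem.Set.mem_union _ _ _).mpr (Or.inl (by rw [hj0] at hs; simpa using hs))
      | succ i0 =>
        simp only [pvCombs, List.mem_append] at hc
        rcases hc with hc | hc
        · rcases List.mem_map.mp hc with ⟨c0, hc0, rfl⟩
          refine ⟨i0, by omega, c0, hc0, s + x, ?_, by simp; ring⟩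
          have ht : j - i0 = (j - (i0 + 1)) + 1 := by omega
          rw [ht, pvRound_getD_succ k x dp _ (by omega)]
          exact (PySem.Set.mem_union _ _ _).mpr (Or.inr (List.mem_map.mpr ⟨s, hs, rfl⟩))
        · refine ⟨i0 + 1, hi, c, hc, s, ?_, rfl⟩
          rcases hsub : j - (i0 + 1) with _ | t
          · rw [pvRound_getD_zero]; rw [hsub] at hs; exact hs
          · rw [pvRound_getD_succ k x dp t (by omega)]
            rw [hsub] at hs
            exact (PySem.Set.mem_union _ _ _).mpr (Or.inl hs)

theorem pv_final_mem (ds : List Int) (k : Nat) (v : Int) :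
    v ∈ ((ds.foldl (fun dp x => pvRound k x dp) ([(0 : Int)] :: (List.range k).map (fun _ => PySem.Set.empty))).getD k [])
      ↔ v ∈ (pvCombs k ds).map List.sum := by
  rw [pv_dp_mem ds k _ k (le_refl k) v]
  constructor
  · rintro ⟨i, hi, c, hc, s, hs, rfl⟩
    rcases hsub : k - i with _ | t
    · have : i = k := by omega
      subst this
      rw [hsub] at hs
      simp only [List.getD_cons_zero, List.mem_singleton] at hs
      subst hs
      exact List.mem_map.mpr ⟨c, hc, by simp⟩
    · rw [hsub, List.getD_cons_succ, List.getD_eq_getElem?_getD, List.getElem?_map,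
        List.getElem?_range (by omega)] at hs
      simp [PySem.Set.empty] at hs
  · intro hv
    rcases List.mem_map.mp hv with ⟨c, hc, rfl⟩
    exact ⟨k, le_refl k, c, hc, 0, by simp, by simp⟩

-- ===== VERDICT (by name: the statement is the Claim_ definition above) =====
theorem best_travel_spec : Claim_equal_best_travel := by
  intro M n ds _ hpre
  unfold Spec_best_travel best_travel best_travel_alt
  by_cases hbig : n > (ds.length : Int)
  · rw [if_pos (Or.inr hbig)]
    have : pvCombs n.toNat ds = [] := pvCombs_nil n.toNat ds (by omega)
    rw [this]
    simp only [List.map_nil, List.filter_nil]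
    rw [(PySem.List.sorted_eq_nil_iff _ _ _).mpr rfl]
    rfl
  · rw [if_neg (by unfold Pre_best_travel at hpre; exact not_or.mpr ⟨by omega, by omega⟩)]
    rw [pvA_eq_condMax, pvB_fold_eq_condMax]
    exact (pvCondMax_congr M _ _ (fun v => pv_final_mem ds n.toNat v)).symm
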